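-- pv_equiv track=rewrite | github.com/chrismmorin-ux/Perspective-Cosmology | verification/sympy/cyclotomic_selection_analysis.py | find_precision_number_sources
-- ===== SOURCE A (Python) =====
-- PRECISION_NUMBERS = {
--     111,  # alpha: 4/111
--     133,  # Weinberg: 10/133
--     72,   # m_p/m_e: 11/72
--     194,  # Weinberg: 171/194
-- }
--
-- def find_precision_number_sources(cyc_table):
--     """Find ALL ways to produce the precision-critical numbers."""
--     sources = {}
--
--     for num in PRECISION_NUMBERS:
--         sources[num] = []
--         for (k, m), val in cyc_table.items():
--             if val == num:
--                 sources[num].append((k, m))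
--
--     return sources
-- ===== SOURCE B (Python) =====
-- PRECISION_NUMBERS_ORDERED = (72, 194, 133, 111)  # alpha 4/111, Weinberg 10/133 & 171/194, m_p/m_e 11/72
--
-- def find_precision_number_sources(cyc_table):
--     """Find ALL ways to produce the precision-critical numbers (single-pass bucketing)."""
--     buckets = {}
--     for (k, m), val in cyc_table.items():
--         buckets.setdefault(val, []).append((k, m))
--     return {num: buckets.get(num, []) for num in PRECISION_NUMBERS_ORDERED}
-- ===== Notes on version B (the rewrite author's own statement) =====
-- stated objective: faster
-- what changed: B replaces A's four full scans of the table (one per precision number) by a single pass that buckets every entry by its value into a dict, then looks up the four precision numbers with an empty-list default.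
import Mathlib
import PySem

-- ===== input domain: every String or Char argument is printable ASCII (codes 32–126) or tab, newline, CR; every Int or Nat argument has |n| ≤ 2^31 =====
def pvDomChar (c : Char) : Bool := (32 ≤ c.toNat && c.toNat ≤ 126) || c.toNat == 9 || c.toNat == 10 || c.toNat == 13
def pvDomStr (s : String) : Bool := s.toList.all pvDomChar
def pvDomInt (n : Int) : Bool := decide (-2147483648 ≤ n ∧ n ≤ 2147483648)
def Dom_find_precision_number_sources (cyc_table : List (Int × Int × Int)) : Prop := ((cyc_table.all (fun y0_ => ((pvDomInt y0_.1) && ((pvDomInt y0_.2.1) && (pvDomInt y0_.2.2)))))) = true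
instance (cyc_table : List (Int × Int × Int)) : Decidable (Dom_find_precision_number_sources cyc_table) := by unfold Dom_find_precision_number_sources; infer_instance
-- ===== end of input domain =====

-- B: one bucketing pass over the table plus four lookups instead of A's four full scans (objective: faster, constant factor).

-- ===== PORT A =====
-- iteration order of CPython's set literal {111, 133, 72, 194} (small-int hashing): 72, 194, 133, 111
def pvPrecisionNumbers : List Int := [72, 194, 133, 111]

def find_precision_number_sources (cyc_table : List (Int × Int × Int)) : List (Int × List (Int × Int)) :=
  pvPrecisionNumbers.foldl
    (fun sources num =>
      sources ++ [(num, cyc_table.foldl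
        (fun acc e => if e.2.2 == num then acc ++ [(e.1, e.2.1)] else acc) [])])
    []

-- ===== PORT B =====
def find_precision_number_sources_alt (cyc_table : List (Int × Int × Int)) : List (Int × List (Int × Int)) :=
  let buckets : PySem.Dict Int (List (Int × Int)) :=
    cyc_table.foldl (fun d e => d.modify e.2.2 [] (· ++ [(e.1, e.2.1)])) PySem.Dict.empty
  pvPrecisionNumbers.foldl (fun out num => out ++ [(num, buckets.getD num [])]) []

-- ===== PRECONDITION & SPEC =====
def Spec_find_precision_number_sources (cyc_table : List (Int × Int × Int)) (out : List (Int × List (Int × Int))) : Prop := out = find_precision_number_sources_alt cyc_table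
instance (cyc_table : List (Int × Int × Int)) (out : List (Int × List (Int × Int))) : Decidable (Spec_find_precision_number_sources cyc_table out) := by unfold Spec_find_precision_number_sources; infer_instance

-- ===== CLAIM (what is proved, stated in full; the proofs are below) =====
def Claim_equal_find_precision_number_sources : Prop := ∀ (cyc_table : List (Int × Int × Int)), Dom_find_precision_number_sources cyc_table → Spec_find_precision_number_sources cyc_table (find_precision_number_sources cyc_table)

-- ===== LEMMAS AND PROOFS =====
-- B's bucket lookup equals A's per-number scan.
theorem pv_bucket_eq (cyc_table : List (Int × Int × Int)) (num : Int) :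
    (cyc_table.foldl (fun d e => d.modify e.2.2 [] (· ++ [(e.1, e.2.1)])) (PySem.Dict.empty (κ := Int) (ν := List (Int × Int)))).getD num []
      = (cyc_table.filter (fun e => e.2.2 == num)).map (fun e => (e.1, e.2.1)) := by
  have h : cyc_table.foldl (fun d e => d.modify e.2.2 [] (· ++ [(e.1, e.2.1)])) (PySem.Dict.empty (κ := Int) (ν := List (Int × Int)))
      = (cyc_table.map (fun e => (e.2.2, (e.1, e.2.1)))).foldl (fun d p => d.modify p.1 [] (· ++ [p.2])) PySem.Dict.empty := by
    rw [List.foldl_map]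
  rw [h, PySem.Dict.getD_foldl_modify_append, PySem.Dict.getD_empty, List.filter_map, List.map_map]
  simp [Function.comp_def]

-- ===== VERDICT (by name: the statement is the Claim_ definition above) =====
theorem find_precision_number_sources_spec : Claim_equal_find_precision_number_sources := by
  intro cyc_table _
  unfold Spec_find_precision_number_sources find_precision_number_sources find_precision_number_sources_alt
  simp only [PySem.List.foldl_append_if, PySem.List.foldl_append_singleton_eq_map, List.nil_append,
    pv_bucket_eq]
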